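-- pv_equiv track=rewrite | github.com/PhasesResearchLab/ESPEI | espei/core_utils.py | endmembers_from_interaction
-- ===== SOURCE A (Python) =====
-- import itertools
--
-- def endmembers_from_interaction(configuration):
--     """For a given configuration with possible interactions, return all the endmembers"""
--     config = []
--     for c in configuration:
--         if isinstance(c, (list, tuple)):
--             config.append(c)
--         else:
--             config.append([c])
--     return list(itertools.product(*[tuple(c) for c in config]))
-- ===== SOURCE B (Python) =====
-- def endmembers_from_interaction(configuration):
--     """For a given configuration with possible interactions, return all the endmembers"""
--     config = [c if isinstance(c, (list, tuple)) else [c] for c in configuration]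
--     total = 1
--     for c in config:
--         total *= len(c)
--     endmembers = []
--     for i in range(total):
--         rem = i
--         picks = []
--         for c in reversed(config):
--             rem, d = divmod(rem, len(c))
--             picks.append(c[d])
--         endmembers.append(tuple(reversed(picks)))
--     return endmembers
-- ===== Notes on version B (the rewrite author's own statement) =====
-- stated objective: alternative
-- what changed: B counts the total number of endmembers and decodes each index 0..total-1 into a tuple by mixed-radix divmod over the sublattice lengths, instead of expanding the Cartesian product incrementally via itertools.product.
import Mathlib
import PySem

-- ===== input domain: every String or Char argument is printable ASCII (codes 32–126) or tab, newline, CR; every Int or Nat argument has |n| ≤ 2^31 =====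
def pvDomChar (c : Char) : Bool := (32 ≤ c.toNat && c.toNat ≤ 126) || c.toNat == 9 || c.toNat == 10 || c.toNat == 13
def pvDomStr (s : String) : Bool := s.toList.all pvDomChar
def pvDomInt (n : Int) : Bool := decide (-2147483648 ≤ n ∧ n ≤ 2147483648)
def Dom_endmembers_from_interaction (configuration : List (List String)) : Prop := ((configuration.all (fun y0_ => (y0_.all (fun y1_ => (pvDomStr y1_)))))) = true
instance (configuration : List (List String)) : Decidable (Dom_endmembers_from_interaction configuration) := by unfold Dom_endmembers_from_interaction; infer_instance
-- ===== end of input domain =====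

-- B enumerates the endmembers by mixed-radix index decoding (count the total, divmod each
-- index into digits) instead of A's itertools.product expansion; same values and order
-- (objective: alternative). Under the stated type List (List String) every element is a
-- list, so A's/B's isinstance check always takes the list branch; the ports reflect that.

-- ===== PORT A =====
-- itertools.product over a list of sublattices, first sublattice outermost (Python's order)
def pvItProduct (ls : List (List String)) : List (List String) :=
  match ls with
  | [] => [[]]
  | c :: rest => c.flatMap (fun x => (pvItProduct rest).map (fun t => x :: t))

def endmembers_from_interaction (configuration : List (List String)) : List (List String) :=
  -- config = []; for c in configuration: config.append(c)  (isinstance always true for List String)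
  let config := configuration.foldl (fun acc c => acc ++ [c]) []
  pvItProduct config

-- ===== PORT B =====
-- inner loop: for c in reversed(config): rem, d = divmod(rem, len(c)); picks.append(c[d])
-- (i is a nonnegative Python int, so divmod is Nat division/modulo here; c[d] is in range
-- whenever the loop runs, ported as getD with an unreachable default)
def pvDecode : List (List String) → Nat → List String
  | [], _ => []
  | c :: rest, rem => c.getD (rem % c.length) "" :: pvDecode rest (rem / c.length)

def endmembers_from_interaction_alt (configuration : List (List String)) : List (List String) :=
  let config := configuration.map (fun c => c)   -- isinstance always true on this type
  let total := config.foldl (fun a c => a * c.length) 1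
  (List.range total).map (fun i => (pvDecode config.reverse i).reverse)

-- ===== PRECONDITION & SPEC =====
def Spec_endmembers_from_interaction (configuration : List (List String)) (out : List (List String)) : Prop := out = endmembers_from_interaction_alt configuration
instance (configuration : List (List String)) (out : List (List String)) : Decidable (Spec_endmembers_from_interaction configuration out) := by unfold Spec_endmembers_from_interaction; infer_instance

-- ===== CLAIM (what is proved, stated in full; the proofs are below) =====
def Claim_equal_endmembers_from_interaction : Prop := ∀ (configuration : List (List String)), Dom_endmembers_from_interaction configuration → Spec_endmembers_from_interaction configuration (endmembers_from_interaction configuration)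

-- ===== LEMMAS AND PROOFS =====

theorem foldl_append_id (l : List (List String)) (acc : List (List String)) :
    l.foldl (fun a c => a ++ [c]) acc = acc ++ l := by
  induction l generalizing acc with
  | nil => simp
  | cons c rest ih => simp [List.foldl, ih, List.append_assoc]

theorem foldl_mul_len (l : List (List String)) (a : Nat) :
    l.foldl (fun a c => a * c.length) a = a * (l.map List.length).prod := by
  induction l generalizing a with
  | nil => simp
  | cons c rest ih => simp [List.foldl, ih, Nat.mul_assoc]

theorem map_getD_range (l : List String) (x : String) :
    (List.range l.length).map (fun d => l.getD d x) = l := by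
  apply List.ext_getElem
  · simp
  · intro i h1 h2
    simp only [List.getElem_map, List.getElem_range]
    exact l.getD_eq_getElem x (by simpa using h2)

theorem itprod_append (xs : List (List String)) (c : List String) :
    pvItProduct (xs ++ [c]) = (pvItProduct xs).flatMap (fun t => c.map (fun x => t ++ [x])) := by
  induction xs with
  | nil =>
      simp only [List.nil_append, pvItProduct, List.flatMap_cons, List.flatMap_nil]
      induction c with
      | nil => simp
      | cons a t iht => simp_all
  | cons y rest ih =>
      simp only [List.cons_append, pvItProduct, ih]
      conv_rhs => rw [List.flatMap_assoc]
      apply List.flatMap_congr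
      intro x _
      rw [List.map_flatMap, List.flatMap_map]
      apply List.flatMap_congr
      intro a _
      simp [Function.comp_def, List.map_map]

theorem range_mul_flatMap (m n : Nat) :
    List.range (m * n) = (List.range m).flatMap (fun j => (List.range n).map (fun d => j * n + d)) := by
  induction m with
  | zero => simp
  | succ m ih =>
      rw [Nat.succ_mul, List.range_add, ih, List.range_succ]
      simp [Nat.mul_comm]

theorem decode_correct (rcs : List (List String)) :
    pvItProduct rcs.reverse
      = (List.range (rcs.map List.length).prod).map (fun i => (pvDecode rcs i).reverse) := by
  induction rcs with
  | nil => simp [pvItProduct, pvDecode]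
  | cons c rest ih =>
      have : (List.reverse (c :: rest)) = rest.reverse ++ [c] := by simp
      rw [this, itprod_append, ih]
      simp only [List.map_cons, List.prod_cons]
      rw [Nat.mul_comm, range_mul_flatMap, List.flatMap_map, List.map_flatMap]
      apply List.flatMap_congr
      intro j hj
      rw [List.map_map]
      conv_lhs => rw [← map_getD_range c "", List.map_map]
      apply List.map_congr_left
      intro d hd
      have hdn : d < c.length := List.mem_range.mp hd
      have hp : 0 < c.length := by omega
      have h1 : (j * c.length + d) % c.length = d := by
        rw [Nat.add_comm, Nat.mul_comm, Nat.add_mul_mod_self_left, Nat.mod_eq_of_lt hdn]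
      have h2 : (j * c.length + d) / c.length = j := by
        rw [Nat.add_comm, Nat.mul_comm, Nat.add_mul_div_left _ _ hp, Nat.div_eq_of_lt hdn]
        omega
      simp [pvDecode, h1, h2]

theorem endmembers_from_interaction_spec : Claim_equal_endmembers_from_interaction := by
  intro configuration _
  show endmembers_from_interaction configuration = endmembers_from_interaction_alt configuration
  unfold endmembers_from_interaction endmembers_from_interaction_alt
  simp only [foldl_append_id, List.nil_append, List.map_id', foldl_mul_len, Nat.one_mul]
  have := decode_correct configuration.reverse
  simpa [List.map_reverse, List.prod_reverse] using this
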